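-- pv_equiv track=rewrite | github.com/lordsaturos/Python-Learning_Course-Udemy | Seccion_5_Metodos_Funciones_Return_Interacciones_argumentos/Seccion5.py | todos_positivos
-- ===== SOURCE A (Python) =====
-- def todos_positivos(lista):
--     valor = True
--     for n in lista:
--         if n > 0:
--             valor = valor and True
--         elif n <= 0:
--             valor = valor and False
--
--     return valor
-- ===== SOURCE B (Python) =====
-- def todos_positivos(lista):
--     return not lista or min(lista) > 0
-- ===== Notes on version B (the rewrite author's own statement) =====
-- stated objective: simpler
-- what changed: Replaces the per-element branch-and-fold running boolean with a single aggregate: compute min(lista) and compare it to 0, with an empty-list short-circuit.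
import Mathlib
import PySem

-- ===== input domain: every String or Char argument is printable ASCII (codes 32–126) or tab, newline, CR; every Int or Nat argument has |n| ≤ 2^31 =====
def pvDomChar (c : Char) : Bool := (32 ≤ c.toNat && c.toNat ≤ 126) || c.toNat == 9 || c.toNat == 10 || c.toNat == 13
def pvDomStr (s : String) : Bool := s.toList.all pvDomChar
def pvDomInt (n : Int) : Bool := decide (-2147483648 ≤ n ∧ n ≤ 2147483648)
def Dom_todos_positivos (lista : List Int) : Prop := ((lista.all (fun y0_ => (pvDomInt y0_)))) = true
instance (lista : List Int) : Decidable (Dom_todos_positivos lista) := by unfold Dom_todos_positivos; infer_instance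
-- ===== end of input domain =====

-- B replaces A's per-element branch-and-fold running boolean with one aggregate: min(lista) compared to 0, with an empty-list short-circuit (objective: simpler).


-- ===== PORT A =====
def todos_positivos (lista : List Int) : Bool :=
  lista.foldl (fun valor n =>
    if n > 0 then valor && true
    else if n ≤ 0 then valor && false
    else valor) true

-- ===== PORT B =====
def todos_positivos_alt (lista : List Int) : Bool :=
  lista.isEmpty || (match PySem.List.min? lista (fun x => x) with
    | some m => decide (m > 0)
    | none => false)

-- ===== PRECONDITION & SPEC =====
def Spec_todos_positivos (lista : List Int) (out : Bool) : Prop := out = todos_positivos_alt lista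
instance (lista : List Int) (out : Bool) : Decidable (Spec_todos_positivos lista out) := by unfold Spec_todos_positivos; infer_instance

-- ===== CLAIM (what is proved, stated in full; the proofs are below) =====
def Claim_equal_todos_positivos : Prop := ∀ (lista : List Int), Dom_todos_positivos lista → Spec_todos_positivos lista (todos_positivos lista)

-- ===== LEMMAS AND PROOFS =====

-- ===== VERDICT (by name: the statement is the Claim_ definition above) =====
theorem foldlA (t : List Int) (v : Bool) :
    t.foldl (fun valor n => if n > 0 then valor && true else if n ≤ 0 then valor && false else valor) v
      = (v && t.all (fun n => decide (n > 0))) := by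
  induction t generalizing v with
  | nil => simp
  | cons h t ih =>
    simp only [List.foldl_cons, List.all_cons, ih]
    by_cases h0 : h > 0 <;> simp [h0, le_of_not_gt]

theorem min_pos (t : List Int) (h : Int) :
    decide (List.foldl min h t > 0) = (decide (h > 0) && t.all (fun n => decide (n > 0))) := by
  induction t generalizing h with
  | nil => simp
  | cons b t ih =>
    rw [List.foldl_cons, ih (min h b), List.all_cons]
    by_cases hh : 0 < h <;> by_cases hb : 0 < b <;>
      simp [lt_min_iff, hh, hb, Bool.and_assoc]

theorem todos_positivos_spec : Claim_equal_todos_positivos := by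
  intro lista _
  unfold Spec_todos_positivos todos_positivos todos_positivos_alt
  rw [foldlA]
  cases lista with
  | nil => simp
  | cons h t =>
    rw [PySem.List.min?_id_cons]
    simp [min_pos]
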